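-- pv_equiv track=rewrite | github.com/KuvaKodes/AI-1-and-2 | Unit 2 Constraint Satisfaction/2 Vardhan Kushaan n_queens_incremental.py | least_conflicted_squares
-- ===== SOURCE A (Python) =====
-- def num_conflicts(board, row_num):
--     tot_conf = 0
--     val = board[row_num]
--     for i in range(row_num):
--         if board[i] == val:
--             tot_conf = tot_conf +1
--     for g in range(row_num+1, len(board)):
--         if board[g] == val:
--             tot_conf = tot_conf +1
--     if row_num > 0:
--         step_counter = 1
--         for back in board[row_num-1::-1]:
--             if back == val - step_counter or back == val + step_counter:
--                 tot_conf = tot_conf +1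
--             step_counter = step_counter+1
--     step_counter = 1
--     for forw in board[row_num+1::]:
--         if forw == val - step_counter or forw == val + step_counter:
--             tot_conf = tot_conf +1
--         step_counter = step_counter+1
--     return tot_conf
--
-- def least_conflicted_squares(board, row_num):
--     least_conflicted_squares_list = list()
--     col_to_conflicts = {g : 0 for g in range(len(board))}
--     for i in range(len(board)):
--         new_board = board.copy()
--         new_board[row_num] = i
--         col_to_conflicts[i] = num_conflicts(new_board, row_num)
--     min = 9223372036854775807
--     for g in col_to_conflicts:
--         if col_to_conflicts[g] < min:
--             min = col_to_conflicts[g]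
--     for n in col_to_conflicts:
--         if col_to_conflicts[n] == min:
--             least_conflicted_squares_list.append(n)
--     return least_conflicted_squares_list
-- ===== SOURCE B (Python) =====
-- def least_conflicted_squares(board, row_num):
--     # One tally pass: for every candidate value v, count how many other rows attack
--     # column v (column hit c, diagonal hits c-d / c+d at distance d), then read each
--     # candidate column's conflict count off the tally in O(1).
--     if not board:
--         return []
--     row = range(len(board))[row_num]  # validate the row index (raises IndexError like board[row_num])
--     hits = {}
--     for j, c in enumerate(board):
--         if j == row:
--             continue
--         d = abs(j - row)
--         for v in (c, c - d, c + d):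
--             hits[v] = hits.get(v, 0) + 1
--     conflicts = [hits.get(v, 0) for v in range(len(board))]
--     best = min(conflicts)
--     return [v for v, c in enumerate(conflicts) if c == best]
-- ===== Notes on version B (the rewrite author's own statement) =====
-- stated objective: faster
-- what changed: Instead of rebuilding the board and rescanning all rows for every candidate column (O(n^2)), B makes one pass over the board tallying, for each value, how many rows attack it by column or diagonal, then reads every candidate's conflict count from the tally in O(1).
-- outside the precondition, e.g. on least_conflicted_squares([-2, 1], -2): A returns [0], B returns [0, 1]; on least_conflicted_squares([0, 0], -1): A returns [0, 1], B returns [0, 1]; on least_conflicted_squares([1, 2], 5): A raises IndexError, B raises IndexError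
import Mathlib
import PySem

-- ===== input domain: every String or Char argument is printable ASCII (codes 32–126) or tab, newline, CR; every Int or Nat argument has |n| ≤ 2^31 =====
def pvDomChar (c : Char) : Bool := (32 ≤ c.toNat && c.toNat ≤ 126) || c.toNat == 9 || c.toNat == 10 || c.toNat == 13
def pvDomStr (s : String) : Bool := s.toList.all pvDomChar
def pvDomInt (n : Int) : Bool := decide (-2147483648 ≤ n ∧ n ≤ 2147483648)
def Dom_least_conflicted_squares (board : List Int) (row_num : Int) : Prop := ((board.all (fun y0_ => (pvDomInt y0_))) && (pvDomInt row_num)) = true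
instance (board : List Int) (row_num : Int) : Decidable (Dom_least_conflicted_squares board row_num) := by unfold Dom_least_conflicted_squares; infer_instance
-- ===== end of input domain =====

-- B replaces A's rebuild-and-rescan per candidate column by one tally pass over the board (objective: faster).

-- ===== PORT A =====
def num_conflicts (board : List Int) (row_num : Int) : Int :=
  -- board[row_num]: in-range at every call site admitted by Pre_ (IndexError is excluded there)
  let val := PySem.List.pyGetD board row_num 0
  let tot : Int := (PySem.List.pyRange 0 row_num).foldl
    (fun t i => if PySem.List.pyGetD board i 0 = val then t + 1 else t) 0
  let tot := (PySem.List.pyRange (row_num + 1) (PySem.List.len board)).foldl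
    (fun t g => if PySem.List.pyGetD board g 0 = val then t + 1 else t) tot
  let tot := if row_num > 0 then
      (((PySem.List.slice? board (some (row_num - 1)) none (-1)).getD []).foldl
        (fun (p : Int × Int) back =>
          (if back = val - p.2 ∨ back = val + p.2 then p.1 + 1 else p.1, p.2 + 1)) (tot, 1)).1
    else tot
  ((PySem.List.slice board (some (row_num + 1)) none).foldl
    (fun (p : Int × Int) forw =>
      (if forw = val - p.2 ∨ forw = val + p.2 then p.1 + 1 else p.1, p.2 + 1)) (tot, 1)).1

def least_conflicted_squares (board : List Int) (row_num : Int) : List Int :=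
  let col_to_conflicts : PySem.Dict Int Int :=
    (PySem.List.pyRange 0 (PySem.List.len board)).foldl (fun d g => d.insert g 0) PySem.Dict.empty
  -- new_board[row_num] = i: pySetD is the total form, in range under Pre_
  let col_to_conflicts :=
    (PySem.List.pyRange 0 (PySem.List.len board)).foldl
      (fun d i => d.insert i (num_conflicts (PySem.List.pySetD board row_num i) row_num)) col_to_conflicts
  let min := col_to_conflicts.keys.foldl
    (fun m g => if col_to_conflicts.getD g 0 < m then col_to_conflicts.getD g 0 else m) 9223372036854775807
  col_to_conflicts.keys.foldl
    (fun acc n => if col_to_conflicts.getD n 0 = min then acc ++ [n] else acc) []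

-- ===== PORT B =====
def alt_hits (board : List Int) (row_num : Int) : PySem.Dict Int Int :=
  (PySem.List.enumerate board 0).foldl
    (fun h jc =>
      if jc.1 = row_num then h
      else
        let d := |jc.1 - row_num|
        [jc.2, jc.2 - d, jc.2 + d].foldl (fun h v => h.insert v (h.getD v 0 + 1)) h)
    PySem.Dict.empty

def least_conflicted_squares_alt (board : List Int) (row_num : Int) : List Int :=
  if board = [] then []
  else
    -- row = range(len(board))[row_num]: IndexError (= none) is excluded by Pre_
    let row := (PySem.List.pyGet? (PySem.List.pyRange 0 (PySem.List.len board)) row_num).getD 0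
    let hits := alt_hits board row
    let conflicts := (PySem.List.pyRange 0 (PySem.List.len board)).map (fun v => hits.getD v 0)
    -- min(conflicts): conflicts is non-empty here, so Python's min returns
    let best := (PySem.List.min? conflicts (fun x => x)).getD 0
    (PySem.List.enumerate conflicts 0).foldl
      (fun acc vc => if vc.2 = best then acc ++ [vc.1] else acc) []

-- ===== PRECONDITION & SPEC =====
-- Pre_ restricts to the function's natural domain: real row indices 0 <= row_num < len(board) (or an empty
-- board, on which A returns [] without indexing). It excludes out-of-range row_num, where A raises IndexError,
-- and in-range negative row_num, where Python's negative-index wraparound makes A mix the conflict scans of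
-- two different rows (even counting the queried square against itself), while B normalizes such an index to
-- the row it actually denotes.
def Pre_least_conflicted_squares (board : List Int) (row_num : Int) : Prop :=
  board = [] ∨ (0 ≤ row_num ∧ row_num < (board.length : Int))
instance (board : List Int) (row_num : Int) : Decidable (Pre_least_conflicted_squares board row_num) := by
  unfold Pre_least_conflicted_squares; infer_instance

def pvWitness_least_conflicted_squares : List Int × Int := ([0, 1], 0)

def Spec_least_conflicted_squares (board : List Int) (row_num : Int) (out : List Int) : Prop :=
  out = least_conflicted_squares_alt board row_num
instance (board : List Int) (row_num : Int) (out : List Int) : Decidable (Spec_least_conflicted_squares board row_num out) := by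
  unfold Spec_least_conflicted_squares; infer_instance

-- ===== CLAIM =====
def Claim_equal_least_conflicted_squares : Prop := ∀ (board : List Int) (row_num : Int), Dom_least_conflicted_squares board row_num → Pre_least_conflicted_squares board row_num → Spec_least_conflicted_squares board row_num (least_conflicted_squares board row_num)

-- ===== LEMMAS AND PROOFS =====

-- the multiset of column values attacked by the other rows: a row j ≠ row_num holding value c at
-- distance d = |j - row_num| attacks the column values c, c-d and c+d
def trip (row_num : Int) (p : Int × Int) : List Int :=
  if p.1 = row_num then [] else [p.2, p.2 - |p.1 - row_num|, p.2 + |p.1 - row_num|]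

def confL (board : List Int) (row_num : Int) : List Int :=
  (PySem.List.enumerate board 0).flatMap (trip row_num)

-- board[m::-1] is the reversed prefix of length m+1
lemma slice_back (xs : List Int) (m : Nat) (h : m < xs.length) :
    PySem.List.slice? xs (some (m : Int)) none (-1) = some ((xs.take (m + 1)).reverse) := by
  simp [PySem.List.slice?, PySem.List.sliceIndices, h]
  rw [if_neg (by omega : ¬ ((m:Int) < 0))]
  rw [if_pos (by omega : (-1:Int) < (m:Int))]
  rw [show ((m:Int) + 1).toNat = m + 1 by omega]
  have h1 : ∀ k ∈ List.range (m+1), xs[((m:Int) + -(k:Int)).toNat]? = some (xs.getD (m - k) 0) := by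
    intro k hk
    simp only [List.mem_range] at hk
    rw [show ((m:Int) + -(k:Int)).toNat = m - k by omega]
    rw [List.getD, List.getElem?_eq_getElem (by omega)]
    simp
  rw [List.filterMap_eq_map_iff_forall_eq_some.mpr h1]
  apply List.ext_getElem
  · simp; omega
  · intro i h1 h2
    simp only [List.getElem_map, List.getElem_range, List.getElem_reverse, List.getD]
    simp only [List.length_reverse, List.length_take] at h2 ⊢
    rw [List.getElem?_eq_getElem (by omega)]
    simp only [Option.getD_some, List.getElem_take]
    congr 1
    omega

lemma foldl_count (l : List Int) (v : Int) (t : Int) :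
    l.foldl (fun t x => if x = v then t + 1 else t) t = t + (l.count v : Int) := by
  have := PySem.List.foldl_count_if (fun x => x == v) l t
  simpa [List.count] using this

lemma loop1_count (xs : List Int) (v : Int) : ∀ (m : Nat), m ≤ xs.length →
    (PySem.List.pyRange 0 (m : Int)).foldl
      (fun t i => if PySem.List.pyGetD xs i 0 = v then t + 1 else t) 0 = ((xs.take m).count v : Int) := by
  intro m
  induction m with
  | zero => intro _; simp [PySem.List.pyRange_one_eq_nil (by omega : (0:Int) ≤ 0)]
  | succ k ih =>
    intro hm
    rw [show ((k+1 : Nat) : Int) = (k : Int) + 1 by push_cast; ring]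
    rw [PySem.List.pyRange_one_succ_right (by omega), List.foldl_append, ih (by omega)]
    rw [List.foldl_cons, List.foldl_nil]
    rw [PySem.List.pyGetD_natCast]
    have hk : k < xs.length := by omega
    rw [List.getD, List.getElem?_eq_getElem hk]
    rw [List.take_add_one, List.getElem?_eq_getElem hk]
    simp only [Option.toList_some, List.count_append, Option.getD_some]
    by_cases h : xs[k] = v
    · rw [if_pos h]; simp [h]
    · rw [if_neg h]; simp [h]

lemma forwardFold (v : Int) (zs : List Int) : ∀ (t s : Int),
    (zs.foldl (fun (p : Int × Int) forw =>
      (if forw = v - p.2 ∨ forw = v + p.2 then p.1 + 1 else p.1, p.2 + 1)) (t, s)).1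
    = t + ((PySem.List.enumerate zs s).countP (fun p => decide (p.2 = v - p.1 ∨ p.2 = v + p.1)) : Int) := by
  induction zs with
  | nil => intro t s; simp [PySem.List.enumerate]
  | cons c zs ih =>
    intro t s
    rw [List.foldl_cons, PySem.List.enumerate_cons, List.countP_cons, ih]
    by_cases hc : c = v - s ∨ c = v + s <;> simp [hc] <;> omega

lemma backFold (v : Int) (ys : List Int) : ∀ (t s : Int),
    (ys.reverse.foldl (fun (p : Int × Int) back =>
      (if back = v - p.2 ∨ back = v + p.2 then p.1 + 1 else p.1, p.2 + 1)) (t, s)).1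
    = t + ((PySem.List.enumerate ys 0).countP
        (fun p => decide (p.2 = v - (s + ((ys.length : Int) - 1 - p.1)) ∨ p.2 = v + (s + ((ys.length : Int) - 1 - p.1)))) : Int) := by
  induction ys using List.reverseRecOn with
  | nil => intro t s; simp [PySem.List.enumerate]
  | append_singleton l a ih =>
    intro t s
    rw [List.reverse_append, List.reverse_singleton, List.singleton_append, List.foldl_cons]
    dsimp only
    rw [ih]
    rw [PySem.List.enumerate_append, List.countP_append]
    have e1 : PySem.List.enumerate [a] (0 + (l.length : Int)) = [((l.length : Int), a)] := by
      simp [PySem.List.enumerate]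
    rw [e1]
    have e2 : ∀ p ∈ PySem.List.enumerate l 0,
        (decide (p.2 = v - ((s+1) + ((l.length : Int) - 1 - p.1)) ∨ p.2 = v + ((s+1) + ((l.length : Int) - 1 - p.1)))) = true
        ↔ (decide (p.2 = v - (s + (((l ++ [a]).length : Int) - 1 - p.1)) ∨ p.2 = v + (s + (((l ++ [a]).length : Int) - 1 - p.1)))) = true := by
      intro p _
      simp only [decide_eq_true_eq, List.length_append, List.length_singleton]
      push_cast
      constructor <;> intro h <;> rcases h with h | h <;> [left; right; left; right] <;> omega
    rw [List.countP_congr e2]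
    simp only [List.countP_cons, List.length_append, List.length_singleton]
    by_cases hc : a = v - s ∨ a = v + s
    · rw [if_pos hc]
      have hd : (decide (a = v - (s + ((((l.length : Int) + 1)) - 1 - (l.length : Int))) ∨ a = v + (s + ((((l.length : Int) + 1)) - 1 - (l.length : Int))))) = true := by
        simp only [decide_eq_true_eq]; rcases hc with h | h <;> [left; right] <;> omega
      push_cast [List.countP_nil, hd]
      norm_num
      omega
    · rw [if_neg hc]
      have hd : (decide (a = v - (s + ((((l.length : Int) + 1)) - 1 - (l.length : Int))) ∨ a = v + (s + ((((l.length : Int) + 1)) - 1 - (l.length : Int))))) = false := by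
        simp only [decide_eq_false_iff_not]
        intro h; apply hc; rcases h with h | h <;> [left; right] <;> omega
      push_cast [List.countP_nil, hd]
      omega

lemma count_trip_lt (R v : Int) (l : List (Int × Int)) (hl : ∀ p ∈ l, p.1 < R) :
    (l.flatMap (trip R)).count v
    = l.countP (fun p => p.2 == v)
      + l.countP (fun p => decide (p.2 = v - (R - p.1) ∨ p.2 = v + (R - p.1))) := by
  induction l with
  | nil => simp
  | cons p l ih =>
    have hp := hl p (by simp)
    have habs : |p.1 - R| = R - p.1 := by rw [abs_of_neg (by omega)]; ring
    rw [List.flatMap_cons, List.count_append, List.countP_cons, List.countP_cons,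
        ih (fun q hq => hl q (by simp [hq]))]
    rw [trip, if_neg (by omega), habs]
    simp only [List.count_cons, List.count_nil, beq_iff_eq, decide_eq_true_eq]
    have h4 : R - p.1 ≥ 1 := by omega
    split_ifs <;> push_cast <;> omega

lemma count_trip_gt (R v : Int) (l : List (Int × Int)) (hl : ∀ p ∈ l, R < p.1) :
    (l.flatMap (trip R)).count v
    = l.countP (fun p => p.2 == v)
      + l.countP (fun p => decide (p.2 = v - (p.1 - R) ∨ p.2 = v + (p.1 - R))) := by
  induction l with
  | nil => simp
  | cons p l ih =>
    have hp := hl p (by simp)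
    have habs : |p.1 - R| = p.1 - R := by rw [abs_of_pos (by omega)]
    rw [List.flatMap_cons, List.count_append, List.countP_cons, List.countP_cons,
        ih (fun q hq => hl q (by simp [hq]))]
    rw [trip, if_neg (by omega), habs]
    simp only [List.count_cons, List.count_nil, beq_iff_eq, decide_eq_true_eq]
    have h4 : p.1 - R ≥ 1 := by omega
    split_ifs <;> push_cast <;> omega

lemma enumerate_shift (l : List Int) : ∀ (s t : Int),
    PySem.List.enumerate l (s + t) = (PySem.List.enumerate l s).map (fun p => (p.1 + t, p.2)) := by
  induction l with
  | nil => intro s t; simp [PySem.List.enumerate]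
  | cons c l ih =>
    intro s t
    rw [PySem.List.enumerate_cons, PySem.List.enumerate_cons, List.map_cons]
    simp only []
    rw [show s + t + 1 = (s + 1) + t by ring, ih]

lemma enumerate_map (f : Int → Int) (l : List Int) : ∀ (s : Int),
    PySem.List.enumerate (l.map f) s = (PySem.List.enumerate l s).map (fun p => (p.1, f p.2)) := by
  induction l with
  | nil => intro s; simp [PySem.List.enumerate]
  | cons c l ih =>
    intro s
    rw [List.map_cons, PySem.List.enumerate_cons, PySem.List.enumerate_cons, List.map_cons, ih]

lemma enumerate_pyRange (n : Nat) :
    PySem.List.enumerate (PySem.List.pyRange 0 (n : Int)) 0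
    = (PySem.List.pyRange 0 (n : Int)).map (fun i => (i, i)) := by
  have gen : ∀ (m : Nat) (a : Int), PySem.List.enumerate (PySem.List.pyRange a (a + (m : Int))) a
      = (PySem.List.pyRange a (a + (m : Int))).map (fun i => (i, i)) := by
    intro m
    induction m with
    | zero => intro a; simp [PySem.List.pyRange_one_eq_nil (by omega : a + (0:Int) ≤ a), PySem.List.enumerate]
    | succ k ih =>
      intro a
      rw [PySem.List.pyRange_one_cons (by omega : a < a + ((k+1 : Nat) : Int))]
      rw [PySem.List.enumerate_cons, List.map_cons]
      rw [show a + ((k+1 : Nat) : Int) = (a + 1) + (k : Nat) by push_cast; ring, ih]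
  have := gen n 0
  simpa using this

lemma countP_snd_eq (l : List Int) (s v : Int) :
    (PySem.List.enumerate l s).countP (fun p => p.2 == v) = l.count v := by
  conv_rhs => rw [← PySem.List.map_snd_enumerate l s]
  rw [List.count, List.countP_map]
  rfl

-- core: A's per-candidate rescan of the modified board equals a lookup in B's tally
lemma conf_core (ys zs : List Int) (z v : Int) :
    num_conflicts (ys ++ v :: zs) ((ys.length : Nat) : Int)
    = ((confL (ys ++ z :: zs) ((ys.length : Nat) : Int)).count v : Int) := by
  set L := ys.length with hL
  set nb := ys ++ v :: zs with hnb
  have hlen : nb.length = L + 1 + zs.length := by simp [hnb]; omega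
  have hval : PySem.List.pyGetD nb (L : Int) 0 = v := by
    rw [PySem.List.pyGetD_natCast, List.getD, List.getElem?_append_right (by omega), hL]
    simp
  dsimp only [num_conflicts]
  rw [hval]
  rw [loop1_count nb v L (by omega)]
  have htake : nb.take L = ys := by rw [hnb, hL]; simp
  rw [htake]
  have hlen2 : PySem.List.len nb = (nb.length : Int) := by simp [PySem.List.len_eq]
  rw [hlen2]
  rw [PySem.List.foldl_pyRange_pyGetD' nb 0 (fun t x => if x = v then t + 1 else t) _ (by omega : (0:Int) ≤ (L:Int)+1)]
  have hdrop : nb.drop (((L:Int)+1).toNat) = zs := by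
    rw [show (((L:Int)+1).toNat) = L + 1 by omega, hnb, hL]
    rw [show ys ++ v :: zs = (ys ++ [v]) ++ zs by simp]
    rw [show ys.length + 1 = (ys ++ [v]).length by simp]
    exact List.drop_left
  rw [hdrop, foldl_count]
  by_cases hy : L = 0
  · have hys : ys = [] := List.length_eq_zero_iff.mp hy
    rw [if_neg (by omega : ¬ ((L:Int) > 0))]
    rw [PySem.List.slice_from nb (by omega : (0:Int) ≤ (L:Int)+1), hdrop, forwardFold]
    subst hys
    simp only [List.nil_append] at *
    rw [confL, show ((z :: zs) : List Int) = [z] ++ zs by simp, PySem.List.enumerate_append,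
        List.flatMap_append, List.count_append]
    have h1 : PySem.List.enumerate [z] 0 = [(0, z)] := by simp [PySem.List.enumerate]
    rw [h1]
    have h2 : ([((0:Int), z)].flatMap (trip (L:Int))).count v = 0 := by
      simp [trip, hy]
    rw [h2]
    rw [show (0 : Int) + (List.length [z] : Int) = 1 + (L:Int) by simp [hy], enumerate_shift zs 1 (L:Int)]
    rw [count_trip_gt (R := (L:Int)) v _ (by
      intro p hp
      simp only [List.mem_map] at hp
      obtain ⟨q, hq, rfl⟩ := hp
      rw [PySem.List.mem_enumerate_iff] at hq
      obtain ⟨k, hk, rfl⟩ := hq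
      simp; omega)]
    rw [List.countP_map, List.countP_map]
    have e1 : ((fun (p : Int × Int) => p.2 == v) ∘ (fun p => (p.1 + (L:Int), p.2))) = (fun (p : Int × Int) => p.2 == v) := by
      funext p; simp
    have e2 : ((fun (p : Int × Int) => decide (p.2 = v - (p.1 - (L:Int)) ∨ p.2 = v + (p.1 - (L:Int)))) ∘ (fun p => (p.1 + (L:Int), p.2)))
        = (fun (p : Int × Int) => decide (p.2 = v - p.1 ∨ p.2 = v + p.1)) := by
      funext p; simp only [Function.comp_apply, add_sub_cancel_right]
    rw [e1, e2]
    rw [countP_snd_eq zs 1 v]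
    simp
  · rw [if_pos (by omega : ((L:Nat):Int) > 0)]
    rw [show ((L:Int) - 1) = (((L - 1 : Nat)) : Int) by omega]
    rw [slice_back nb (L-1) (by omega)]
    rw [show (L - 1) + 1 = L by omega]
    rw [Option.getD_some, htake, backFold]
    rw [PySem.List.slice_from nb (by omega : (0:Int) ≤ (L:Int)+1), hdrop, forwardFold]
    rw [confL, show ys ++ z :: zs = ys ++ ([z] ++ zs) by simp, PySem.List.enumerate_append,
        PySem.List.enumerate_append, List.flatMap_append, List.flatMap_append,
        List.count_append, List.count_append]
    have h1 : PySem.List.enumerate [z] (0 + (ys.length : Int)) = [(((ys.length : Int)), z)] := by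
      simp [PySem.List.enumerate]
    rw [h1]
    have h2 : ([(((ys.length:Int)), z)].flatMap (trip (L:Int))).count v = 0 := by
      simp [trip, hL]
    rw [h2]
    rw [count_trip_lt (R := (L:Int)) v (PySem.List.enumerate ys 0) (by
      intro p hp
      rw [PySem.List.mem_enumerate_iff] at hp
      obtain ⟨k, hk, rfl⟩ := hp
      simp [hL]; omega)]
    rw [countP_snd_eq ys 0 v]
    rw [show (0 + (ys.length : Int)) + (List.length [z] : Int) = 1 + (L:Int) by simp [hL]; omega, enumerate_shift zs 1 (L:Int)]
    rw [count_trip_gt (R := (L:Int)) v _ (by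
      intro p hp
      simp only [List.mem_map] at hp
      obtain ⟨q, hq, rfl⟩ := hp
      rw [PySem.List.mem_enumerate_iff] at hq
      obtain ⟨k, hk, rfl⟩ := hq
      simp; omega)]
    rw [List.countP_map, List.countP_map]
    have e1 : ((fun (p : Int × Int) => p.2 == v) ∘ (fun p => (p.1 + (L:Int), p.2))) = (fun (p : Int × Int) => p.2 == v) := by
      funext p; simp
    have e2 : ((fun (p : Int × Int) => decide (p.2 = v - (p.1 - (L:Int)) ∨ p.2 = v + (p.1 - (L:Int)))) ∘ (fun p => (p.1 + (L:Int), p.2)))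
        = (fun (p : Int × Int) => decide (p.2 = v - p.1 ∨ p.2 = v + p.1)) := by
      funext p; simp only [Function.comp_apply, add_sub_cancel_right]
    rw [e1, e2, countP_snd_eq zs 1 v]
    have e4 : (PySem.List.enumerate ys 0).countP
          (fun p => decide (p.2 = v - (1 + ((ys.length : Int) - 1 - p.1)) ∨ p.2 = v + (1 + ((ys.length : Int) - 1 - p.1))))
        = (PySem.List.enumerate ys 0).countP
          (fun p => decide (p.2 = v - ((L:Int) - p.1) ∨ p.2 = v + ((L:Int) - p.1))) := by
      apply List.countP_congr
      intro p _
      simp only [decide_eq_true_eq, hL]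
      constructor <;> intro h <;> rcases h with h | h <;> [left; right; left; right] <;> omega
    rw [e4]
    push_cast
    ring

-- B's dict is the counter of confL
lemma alt_hits_eq (board : List Int) (row_num v : Int) :
    (alt_hits board row_num).getD v 0 = ((confL board row_num).count v : Int) := by
  have e1 : alt_hits board row_num
      = (confL board row_num).foldl (fun h v => h.insert v (h.getD v 0 + 1)) PySem.Dict.empty := by
    unfold alt_hits confL
    rw [List.foldl_flatMap]
    apply PySem.List.foldl_congr_mem
    intro acc x _
    unfold trip
    split_ifs <;> simp
  refine Eq.trans (congrArg (fun d => PySem.Dict.getD d v 0) e1) ?_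
  show (List.foldl (fun (d : PySem.Dict Int Int) x => d.insert x (d.getD x 0 + 1)) PySem.Dict.empty (confL board row_num)).getD v 0 = _
  rw [PySem.Dict.getD_foldl_insert_add_one]
  simp

lemma getD_insertfold_not_mem (l : List Int) (f : Int → Int) :
    ∀ (d : PySem.Dict Int Int) (k : Int), k ∉ l →
      (l.foldl (fun d i => d.insert i (f i)) d).getD k 0 = d.getD k 0 := by
  induction l with
  | nil => intro d k _; rfl
  | cons a l ih =>
    intro d k hk
    rw [List.foldl_cons, ih _ _ (by simp at hk; tauto)]
    rw [PySem.Dict.getD_insert_of_ne _ _ _ (by simp at hk; tauto)]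

lemma getD_insertfold_mem (l : List Int) (f : Int → Int) :
    ∀ (d : PySem.Dict Int Int) (k : Int), l.Nodup → k ∈ l →
      (l.foldl (fun d i => d.insert i (f i)) d).getD k 0 = f k := by
  induction l with
  | nil => intro d k _ hk; simp at hk
  | cons a l ih =>
    intro d k hnd hk
    rw [List.foldl_cons]
    rcases List.mem_cons.mp hk with h | h
    · subst h
      rw [getD_insertfold_not_mem _ f _ _ (by simp at hnd; tauto)]
      exact PySem.Dict.getD_insert_self _ _ _ _
    · exact ih _ _ (by simp at hnd; tauto) h

lemma update_fresh (l : List Int) : ∀ (s : PySem.Set Int), (∀ x ∈ l, x ∉ s) → l.Nodup →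
    PySem.Set.update s l = s ++ l := by
  induction l with
  | nil => intro s _ _; simp [PySem.Set.update]
  | cons a l ih =>
    intro s hfresh hnd
    have step : PySem.Set.update s (a :: l) = PySem.Set.update (s.add a) l := by
      simp [PySem.Set.update]
    have ha : s.add a = s ++ [a] := by
      unfold PySem.Set.add
      rw [if_neg]
      simp only [PySem.Set.contains, List.contains_eq_mem, decide_eq_true_eq]
      exact hfresh a (by simp)
    rw [step, ha, ih (s ++ [a]) ?_ (by simp at hnd; tauto)]
    · simp
    · intro x hx
      simp only [List.mem_append, List.mem_singleton]
      rintro (h | h)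
      · exact hfresh x (by simp [hx]) h
      · subst h; simp at hnd; tauto

lemma update_subset (l : List Int) : ∀ (s : PySem.Set Int), (∀ x ∈ l, x ∈ s) →
    PySem.Set.update s l = s := by
  induction l with
  | nil => intro s _; simp [PySem.Set.update]
  | cons a l ih =>
    intro s hsub
    have step : PySem.Set.update s (a :: l) = PySem.Set.update (s.add a) l := by
      simp [PySem.Set.update]
    have ha : s.add a = s := by
      unfold PySem.Set.add
      rw [if_pos]
      simp only [PySem.Set.contains, List.contains_eq_mem, decide_eq_true_eq]
      exact hsub a (by simp)
    rw [step, ha, ih s (fun x hx => hsub x (by simp [hx]))]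

lemma foldl_min_min (t : List Int) : ∀ (a b : Int), t.foldl min (min a b) = min a (t.foldl min b) := by
  induction t with
  | nil => intro a b; simp
  | cons c t ih =>
    intro a b
    rw [List.foldl_cons, List.foldl_cons, min_assoc, ih]

lemma length_mul_min_le_sum (l : List Int) (m : Int) (h : ∀ x ∈ l, m ≤ x) :
    (l.length : Int) * m ≤ l.sum := by
  induction l with
  | nil => simp
  | cons c l ih =>
    simp only [List.length_cons, List.sum_cons]
    have h1 := h c (by simp)
    have h2 := ih (fun x hx => h x (by simp [hx]))
    push_cast
    nlinarith

lemma sum_counts_le_length (L : List Int) : ∀ (vs : List Int), vs.Nodup →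
    ((vs.map (fun v => (L.count v : Int))).sum ≤ (L.length : Int)) := by
  induction L with
  | nil => intro vs _; simp
  | cons c L ih =>
    intro vs hvs
    have e1 : (vs.map (fun v => ((c :: L).count v : Int))).sum
        = (vs.map (fun v => (L.count v : Int))).sum + (vs.map (fun v => if v = c then (1:Int) else 0)).sum := by
      rw [← PySem.List.sum_map_add_int]
      congr 1
      apply List.map_congr_left
      intro v _
      rw [List.count_cons]
      by_cases h : v = c
      · subst h; simp
      · have hb : (c == v) = false := by simp; exact fun e => h e.symm
        rw [if_neg h]; simp [hb]
    rw [e1]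
    have e2 : (vs.map (fun v => if v = c then (1:Int) else 0)).sum ≤ 1 := by
      have hc := PySem.List.sum_map_ite_one_zero (fun v => v == c) vs
      have e3 : (vs.map (fun v => if v = c then (1:Int) else 0)) = (vs.map (fun x => if (x == c) = true then (1:Int) else 0)) := by
        apply List.map_congr_left; intro v _; simp
      rw [e3, hc]
      have : vs.countP (fun x => x == c) ≤ 1 := by
        rw [← List.count]
        exact List.nodup_iff_count_le_one.mp hvs c
      omega
    have := ih vs hvs
    simp only [List.length_cons]
    push_cast
    omega

lemma confL_length_le (board : List Int) (row_num : Int) :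
    (confL board row_num).length ≤ 3 * board.length := by
  unfold confL
  have h1 : ∀ (l : List (Int × Int)), (l.flatMap (trip row_num)).length ≤ 3 * l.length := by
    intro l
    induction l with
    | nil => simp
    | cons p l ih =>
      rw [List.flatMap_cons, List.length_append]
      have : (trip row_num p).length ≤ 3 := by unfold trip; split_ifs <;> simp
      simp only [List.length_cons]
      omega
  have h2 := h1 (PySem.List.enumerate board 0)
  rwa [PySem.List.length_enumerate] at h2

-- the equivalence on a non-empty board with a genuine (non-negative, in-range) row index
lemma main_eq (board : List Int) (row_num : Int)
    (hr0 : 0 ≤ row_num) (hrn : row_num < (board.length : Int)) :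
    least_conflicted_squares board row_num = least_conflicted_squares_alt board row_num := by
  set n := board.length with hn
  have hn1 : 1 ≤ n := by omega
  set r := row_num.toNat with hr
  have hrow : row_num = (r : Int) := by omega
  have hrlt : r < n := by omega
  set cf : Int → Int := fun g => ((confL board row_num).count g : Int) with hcf
  have hconf : ∀ g : Int, num_conflicts (PySem.List.pySetD board row_num g) row_num = cf g := by
    intro g
    obtain ⟨ys, z, zs, hdec, hlen⟩ : ∃ ys z zs, board = ys ++ z :: zs ∧ ys.length = r := by
      refine ⟨board.take r, board[r]'(by omega), board.drop (r+1), ?_, by simp; omega⟩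
      rw [List.getElem_cons_drop, List.take_append_drop]
    have hset : PySem.List.pySetD board row_num g = ys ++ g :: zs := by
      rw [hrow, PySem.List.pySetD_natCast, hdec, ← hlen, List.set_append]
      simp
    rw [hset, hrow, ← hlen, conf_core ys zs z g, hcf, ← hdec, hlen, ← hrow]
  set range := PySem.List.pyRange 0 (PySem.List.len board) with hrange
  have hlenb : PySem.List.len board = (n : Int) := by simp [PySem.List.len_eq, hn]
  have hnodup : range.Nodup := by rw [hrange]; exact PySem.List.nodup_pyRange_one _ _
  have hrangelen : range.length = n := by
    rw [hrange, hlenb, PySem.List.length_pyRange_one]; omega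
  set d0 : PySem.Dict Int Int := range.foldl (fun d g => d.insert g 0) PySem.Dict.empty with hd0
  set d1 : PySem.Dict Int Int := range.foldl
      (fun d i => d.insert i (num_conflicts (PySem.List.pySetD board row_num i) row_num)) d0 with hd1
  have hkeys0 : d0.keys = range := by
    rw [hd0, PySem.Dict.keys_foldl_insert]
    have : (PySem.Dict.empty : PySem.Dict Int Int).keys = [] := rfl
    rw [this, update_fresh range [] (by simp) hnodup, List.nil_append]
  have hkeys : d1.keys = range := by
    rw [hd1, PySem.Dict.keys_foldl_insert, hkeys0, update_subset range range (fun x hx => hx)]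
  have hget : ∀ g ∈ range, d1.getD g 0 = cf g := by
    intro g hg
    rw [hd1, getD_insertfold_mem range _ d0 g hnodup hg, hconf g]
  have hmin_body : ∀ (m : Int), ∀ g ∈ range, (if d1.getD g 0 < m then d1.getD g 0 else m) = min m (cf g) := by
    intro m g hg
    rw [hget g hg]
    rcases le_or_gt m (cf g) with h | h
    · rw [if_neg (by omega), min_eq_left h]
    · rw [if_pos h, min_eq_right (by omega)]
  have hcons : range = 0 :: PySem.List.pyRange 1 (n : Int) := by
    rw [hrange, hlenb]; exact PySem.List.pyRange_one_cons (by exact_mod_cast hn1)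
  set tl := PySem.List.pyRange 1 (n : Int) with htl
  set m0 : Int := (tl.map cf).foldl min (cf 0) with hm0
  have hminq : PySem.List.min? (range.map cf) (fun x => x) = some m0 := by
    rw [hcons, List.map_cons, PySem.List.min?_id_cons]
  have hm0min : ∀ y ∈ range.map cf, m0 ≤ y := fun y hy => PySem.List.min?_isMin hminq y hy
  have hsum : (range.map cf).sum ≤ ((confL board row_num).length : Int) :=
    sum_counts_le_length (confL board row_num) range hnodup
  have hlen3 : ((confL board row_num).length : Int) ≤ 3 * (n : Int) := by
    have h := confL_length_le board row_num
    rw [← hn] at h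
    exact_mod_cast h
  have hmul := length_mul_min_le_sum (range.map cf) m0 hm0min
  have hlenmap : (((range.map cf).length : Nat) : Int) = (n : Int) := by
    rw [List.length_map, hrangelen]
  rw [hlenmap] at hmul
  have hm03 : m0 ≤ 3 := by nlinarith [hmul, hsum, hlen3, (by exact_mod_cast hn1 : (1:Int) ≤ (n:Int))]
  have hminval : (range.map cf).foldl min 9223372036854775807 = m0 := by
    rw [hcons, List.map_cons, List.foldl_cons, foldl_min_min, hm0, min_eq_right (by omega)]
  have hA : least_conflicted_squares board row_num = range.filter (fun g => cf g == m0) := by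
    dsimp only [least_conflicted_squares]
    rw [← hrange, ← hd0, ← hd1, hkeys]
    rw [PySem.List.foldl_congr_mem range _ (fun m g => min m (cf g)) 9223372036854775807 hmin_body]
    rw [← List.foldl_map, hminval]
    rw [PySem.List.foldl_congr_mem range _
      (fun acc g => if ((fun g => cf g == m0) g) = true then acc ++ [(fun (x : Int) => x) g] else acc) []
      (by
        intro acc g hg
        rw [hget g hg]
        by_cases h : cf g = m0
        · simp [h]
        · simp [h])]
    rw [PySem.List.foldl_append_if]
    simp
  have hB : least_conflicted_squares_alt board row_num = range.filter (fun g => cf g == m0) := by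
    dsimp only [least_conflicted_squares_alt]
    rw [if_neg (by intro h; rw [h] at hn; simp at hn; omega)]
    have hrowv : (PySem.List.pyGet? (PySem.List.pyRange 0 (PySem.List.len board)) row_num).getD 0 = row_num := by
      rw [hlenb, hrow, PySem.List.pyGet?_natCast]
      rw [PySem.List.getElem?_pyRange_one]
      rw [if_pos (by omega)]
      simp
    rw [hrowv, ← hrange]
    simp only [alt_hits_eq]
    rw [← hcf, hminq, Option.getD_some]
    rw [enumerate_map cf range 0]
    rw [show PySem.List.enumerate range 0 = range.map (fun i => (i, i)) from by
      rw [hrange, hlenb]; exact enumerate_pyRange n]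
    rw [List.map_map]
    rw [PySem.List.foldl_congr_mem _ _
      (fun acc (vc : Int × Int) => if ((fun (vc : Int × Int) => vc.2 == m0) vc) = true then acc ++ [(fun (vc : Int × Int) => vc.1) vc] else acc) []
      (by
        intro acc vc _
        by_cases h : vc.2 = m0
        · simp [h]
        · simp [h])]
    rw [PySem.List.foldl_append_if]
    rw [List.filter_map, List.map_map]
    have e5 : ((fun (vc : Int × Int) => vc.2 == m0) ∘ (fun (p : Int × Int) => (p.1, cf p.2)) ∘ (fun (i : Int) => (i, i)))
        = (fun g => cf g == m0) := by funext i; simp [Function.comp]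
    have e6 : ((fun (vc : Int × Int) => vc.1) ∘ (fun (p : Int × Int) => (p.1, cf p.2)) ∘ (fun (i : Int) => (i, i)))
        = (fun (g : Int) => g) := by funext i; simp [Function.comp]
    rw [e5, e6]
    simp
  rw [hA, hB]

-- ===== VERDICT =====
theorem least_conflicted_squares_spec : Claim_equal_least_conflicted_squares := by
  intro board row_num _ hpre
  unfold Spec_least_conflicted_squares
  rcases hpre with hemp | hin
  · subst hemp; rfl
  · by_cases hemp : board = []
    · subst hemp; rfl
    · exact main_eq board row_num hin.1 hin.2
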